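-- pv_equiv track=rewrite | github.com/jgrss/mpglue | mpglue/helpers.py | get_block_chunks
-- ===== SOURCE A (Python) =====
-- def n_rows_cols(pixel_index, block_size, rows_cols):
--
--     if pixel_index + block_size < rows_cols:
--         samp_out = block_size
--     else:
--         samp_out = rows_cols - pixel_index
--
--     return samp_out
--
-- def get_block_chunks(im_rows, im_cols, chunk_size, kernel_size):
--
--     """
--     Gets offset block chunks
--
--     Args:
--         im_rows (int): The number of rows.
--         im_cols (int): The number of columns.
--         chunk_size (int): The block chunk size.
--         kernel_size (int): The moving window size.
--
--     Returns:
--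
--         Indexes:
--             0: i :: actual row index
--             1: isub :: adjusted row starting position
--             2: iplus :: adjusted row end position
--             3: ip :: row start position to read back the chunk
--             4: j :: actual column index
--             5: jsub :: adjusted column starting position
--             6: jplus :: adjusted column end position
--             7: jp :: column start position to read back the chunk
--             8: n_rows :: row chunk size for GDAL
--             9: n_cols :: column chunk size for GDAL
--     """
--
--     block_chunks = []
--
--     chunk = kernel_size + chunk_size + kernel_size
--
--     for i in range(0, im_rows, chunk_size-kernel_size):
--
--         isub = i - kernel_size
--
--         if isub < 0:
--             isub = 0
--             ip = 0
--         else: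
--             ip = kernel_size
--
--         iplus = i + chunk_size + kernel_size
--         iplus = im_rows-1 if iplus >= im_rows else iplus
--
--         n_rows = n_rows_cols(isub, chunk, im_rows)
--
--         for j in range(0, im_cols, chunk_size-kernel_size):
--
--             jsub = j - kernel_size
--
--             if jsub < 0:
--                 jsub = 0
--                 jp = 0
--             else:
--                 jp = kernel_size
--
--             jplus = j + chunk_size + kernel_size
--             jplus = im_cols-1 if jplus >= im_cols else jplus
--
--             n_cols = n_rows_cols(jsub, chunk, im_cols)
--
--             block_chunks.append([i, isub, iplus, ip, j, jsub, jplus, jp, n_rows, n_cols])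
--
--     return block_chunks
-- ===== SOURCE B (Python) =====
-- def get_block_chunks(im_rows, im_cols, chunk_size, kernel_size):
--     step = chunk_size - kernel_size
--     chunk = chunk_size + 2 * kernel_size
--     n_row_steps = max(0, -(-im_rows // step))
--     n_col_steps = max(0, -(-im_cols // step))
--     out = []
--     for k in range(n_row_steps * n_col_steps):
--         ki, kj = divmod(k, n_col_steps)
--         i = ki * step
--         j = kj * step
--         isub = max(i - kernel_size, 0)
--         jsub = max(j - kernel_size, 0)
--         out.append([i, isub,
--                     min(i + chunk_size + kernel_size, im_rows - 1),
--                     0 if i < kernel_size else kernel_size,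
--                     j, jsub,
--                     min(j + chunk_size + kernel_size, im_cols - 1),
--                     0 if j < kernel_size else kernel_size,
--                     min(chunk, im_rows - isub),
--                     min(chunk, im_cols - jsub)])
--     return out
-- ===== Notes on version B (the rewrite author's own statement) =====
-- stated objective: alternative
-- what changed: Replaces A's nested for-loops with branch assignments by a single flat loop over a closed-form total chunk count, recovering each chunk's row/col position from the flat index with divmod and computing every field by a branch-free min/max formula instead of A's if-reassignments.
import Mathlib
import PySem

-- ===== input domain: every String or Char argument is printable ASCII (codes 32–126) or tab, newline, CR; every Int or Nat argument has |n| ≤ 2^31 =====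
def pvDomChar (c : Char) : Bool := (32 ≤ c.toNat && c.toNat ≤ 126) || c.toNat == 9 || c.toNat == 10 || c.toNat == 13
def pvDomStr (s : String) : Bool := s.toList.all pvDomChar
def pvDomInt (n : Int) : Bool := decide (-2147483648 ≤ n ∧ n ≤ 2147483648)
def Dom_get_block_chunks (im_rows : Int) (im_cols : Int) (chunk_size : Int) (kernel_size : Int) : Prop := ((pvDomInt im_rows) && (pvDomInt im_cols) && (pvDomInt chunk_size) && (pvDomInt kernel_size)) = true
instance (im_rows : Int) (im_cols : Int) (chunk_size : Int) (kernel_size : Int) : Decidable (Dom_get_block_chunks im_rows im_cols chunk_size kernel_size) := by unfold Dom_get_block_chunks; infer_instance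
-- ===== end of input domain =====

-- B replaces A's nested loops and if-reassignments by one flat loop over a
-- closed-form chunk count, divmod index recovery and min/max field formulas.

-- B replaces A's nested loops and if-reassignments by one flat loop over a
-- closed-form chunk count, divmod index recovery and min/max field formulas.

-- ===== PORT A =====
def n_rows_cols (pixel_index : Int) (block_size : Int) (rows_cols : Int) : Int :=
  if pixel_index + block_size < rows_cols then block_size else rows_cols - pixel_index

def get_block_chunks (im_rows : Int) (im_cols : Int) (chunk_size : Int) (kernel_size : Int) : List (List Int) :=
  let chunk := kernel_size + chunk_size + kernel_size
  (PySem.List.pyRange 0 im_rows (chunk_size - kernel_size)).foldl (fun bc i =>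
    let isub0 := i - kernel_size
    let isub := if isub0 < 0 then 0 else isub0
    let ip : Int := if isub0 < 0 then 0 else kernel_size
    let iplus0 := i + chunk_size + kernel_size
    let iplus := if iplus0 ≥ im_rows then im_rows - 1 else iplus0
    let n_rows := n_rows_cols isub chunk im_rows
    (PySem.List.pyRange 0 im_cols (chunk_size - kernel_size)).foldl (fun bc2 j =>
      let jsub0 := j - kernel_size
      let jsub := if jsub0 < 0 then 0 else jsub0
      let jp : Int := if jsub0 < 0 then 0 else kernel_size
      let jplus0 := j + chunk_size + kernel_size
      let jplus := if jplus0 ≥ im_cols then im_cols - 1 else jplus0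
      let n_cols := n_rows_cols jsub chunk im_cols
      bc2 ++ [[i, isub, iplus, ip, j, jsub, jplus, jp, n_rows, n_cols]]) bc) []

-- ===== PORT B =====
def get_block_chunks_alt (im_rows : Int) (im_cols : Int) (chunk_size : Int) (kernel_size : Int) : List (List Int) :=
  let step := chunk_size - kernel_size
  let chunk := chunk_size + 2 * kernel_size
  let n_row_steps := max 0 (-(PySem.Int.floordiv (-im_rows) step))
  let n_col_steps := max 0 (-(PySem.Int.floordiv (-im_cols) step))
  (PySem.List.pyRange 0 (n_row_steps * n_col_steps) 1).map (fun k =>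
    let ki := PySem.Int.floordiv k n_col_steps
    let kj := PySem.Int.mod k n_col_steps
    let i := ki * step
    let j := kj * step
    let isub := max (i - kernel_size) 0
    let jsub := max (j - kernel_size) 0
    [i, isub, min (i + chunk_size + kernel_size) (im_rows - 1),
     if i < kernel_size then 0 else kernel_size,
     j, jsub, min (j + chunk_size + kernel_size) (im_cols - 1),
     if j < kernel_size then 0 else kernel_size,
     min chunk (im_rows - isub), min chunk (im_cols - jsub)])


-- ===== PRECONDITION & SPEC =====
-- Pre_ excludes only chunk_size = kernel_size, where range(0, n, 0) in A raises
-- ValueError (and B's floor division by the zero step raises ZeroDivisionError).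
def Pre_get_block_chunks (im_rows : Int) (im_cols : Int) (chunk_size : Int) (kernel_size : Int) : Prop :=
  chunk_size ≠ kernel_size
instance (im_rows : Int) (im_cols : Int) (chunk_size : Int) (kernel_size : Int) : Decidable (Pre_get_block_chunks im_rows im_cols chunk_size kernel_size) := by unfold Pre_get_block_chunks; infer_instance

def pvWitness_get_block_chunks : Int × Int × Int × Int := (10, 8, 4, 1)

def Spec_get_block_chunks (im_rows : Int) (im_cols : Int) (chunk_size : Int) (kernel_size : Int) (out : List (List Int)) : Prop := out = get_block_chunks_alt im_rows im_cols chunk_size kernel_size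
instance (im_rows : Int) (im_cols : Int) (chunk_size : Int) (kernel_size : Int) (out : List (List Int)) : Decidable (Spec_get_block_chunks im_rows im_cols chunk_size kernel_size out) := by unfold Spec_get_block_chunks; infer_instance

-- ===== CLAIM (what is proved, stated in full; the proofs are below) =====
def Claim_equal_get_block_chunks : Prop := ∀ (im_rows : Int) (im_cols : Int) (chunk_size : Int) (kernel_size : Int), Dom_get_block_chunks im_rows im_cols chunk_size kernel_size → Pre_get_block_chunks im_rows im_cols chunk_size kernel_size → Spec_get_block_chunks im_rows im_cols chunk_size kernel_size (get_block_chunks im_rows im_cols chunk_size kernel_size)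

-- ===== LEMMAS AND PROOFS =====
theorem ceil_div (a b : Int) (hb : 0 < b) : -((-a)/b) = (a + b - 1)/b := by
  by_cases hd : b ∣ a
  · obtain ⟨q, rfl⟩ := hd
    rw [show -(b*q) = b * (-q) by ring, Int.mul_ediv_cancel_left _ (by omega), neg_neg,
      show b*q + b - 1 = (b-1) + b * q by ring, Int.add_mul_ediv_left _ _ (by omega),
      Int.ediv_eq_zero_of_lt (by omega) (by omega), zero_add]
  · rw [Int.neg_ediv, if_neg hd, Int.sign_eq_one_of_pos hb]
    have h1 := Int.mul_ediv_add_emod a b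
    have h2 := Int.emod_nonneg a (by omega : b ≠ 0)
    have h3 := Int.emod_lt_of_pos a hb
    have h4 : a % b ≠ 0 := fun h => hd (Int.dvd_of_emod_eq_zero h)
    have h5 : (a % b - 1) / b = 0 := Int.ediv_eq_zero_of_lt (by omega) (by omega)
    rw [show a + b - 1 = (a % b - 1) + b * (a / b + 1) by rw [mul_add, mul_one]; omega,
      Int.add_mul_ediv_left _ _ (by omega : b ≠ 0), h5]
    ring

theorem ceil_count_eq (x b : Int) (hb : 0 < b) :
    (max 0 ((x + b - 1)/b)).toNat = if 0 < x then ((x + b - 1)/b).toNat else 0 := by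
  by_cases hx : 0 < x
  · rw [if_pos hx]
    have : 0 ≤ (x + b - 1)/b := Int.ediv_nonneg (by omega) (by omega)
    omega
  · rw [if_neg hx]
    by_cases hx0 : 0 ≤ x + b - 1
    · have : (x + b - 1)/b = 0 := Int.ediv_eq_zero_of_lt hx0 (by omega)
      omega
    · have : (x + b - 1)/b < 0 := Int.ediv_neg_of_neg_of_pos (by omega) hb
      omega

theorem pyRange_eq_count (n s : Int) (hs : s ≠ 0) :
    PySem.List.pyRange 0 n s
      = (List.range (max 0 (-(PySem.Int.floordiv (-n) s))).toNat).map (fun k : Nat => s * (k : Int)) := by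
  have hcount : (max 0 (-(PySem.Int.floordiv (-n) s))).toNat
      = (if 0 < s then if 0 < n then ((n - 0 + s - 1) / s).toNat else 0
         else if n < 0 then ((0 - n + -s - 1) / -s).toNat else 0) := by
    rcases lt_or_gt_of_ne hs with hneg | hpos
    · rw [if_neg (by omega : ¬ 0 < s),
        show PySem.Int.floordiv (-n) s = PySem.Int.floordiv n (-s) by
          rw [← PySem.Int.floordiv_neg_neg n (-s), neg_neg],
        PySem.Int.floordiv_eq_ediv_of_pos (by omega : (0:Int) < -s),
        show -(n / -s) = -((-(-n)) / -s) by rw [neg_neg],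
        ceil_div (-n) (-s) (by omega), show -n + -s - 1 = 0 - n + -s - 1 by ring,
        ceil_count_eq (0 - n) (-s) (by omega),
        if_congr (by omega : (0 < 0 - n) ↔ (n < 0)) rfl rfl]
    · rw [if_pos hpos, PySem.Int.floordiv_eq_ediv_of_pos hpos, ceil_div n s hpos,
        show n + s - 1 = n - 0 + s - 1 by ring, ceil_count_eq (n - 0) s hpos,
        if_congr (by omega : (0 < n - 0) ↔ (0 < n)) rfl rfl]
  rw [hcount]
  unfold PySem.List.pyRange
  rw [if_neg hs]
  simp only [zero_add]

theorem range_mul_divmod {α : Type} (g : Nat → Nat → α) (nr nc : Nat) :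
    (List.range (nr * nc)).map (fun k => g (k / nc) (k % nc))
      = (List.range nr).flatMap (fun a => (List.range nc).map (g a)) := by
  induction nr with
  | zero => simp
  | succ m ih =>
    rw [Nat.succ_mul, List.range_add, List.map_append, ih, List.range_succ, List.flatMap_append]
    congr 1
    rw [List.map_map]
    simp only [List.flatMap_cons, List.flatMap_nil, List.append_nil]
    apply List.map_congr_left
    intro b hb
    have hblt : b < nc := List.mem_range.mp hb
    simp only [Function.comp]
    rw [Nat.mul_comm m nc, Nat.mul_add_div (by omega), Nat.mul_add_mod,
      Nat.div_eq_of_lt hblt, Nat.mod_eq_of_lt hblt, Nat.add_zero]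

theorem main_eq (im_rows im_cols chunk_size kernel_size : Int)
    (hp : chunk_size ≠ kernel_size) :
    get_block_chunks im_rows im_cols chunk_size kernel_size
      = get_block_chunks_alt im_rows im_cols chunk_size kernel_size := by
  have hs : chunk_size - kernel_size ≠ 0 := by omega
  unfold get_block_chunks get_block_chunks_alt
  simp only
  set Nr := max 0 (-(PySem.Int.floordiv (-im_rows) (chunk_size - kernel_size))) with hNr
  set Nc := max 0 (-(PySem.Int.floordiv (-im_cols) (chunk_size - kernel_size))) with hNc
  have hNr0 : 0 ≤ Nr := le_max_left _ _
  have hNc0 : 0 ≤ Nc := le_max_left _ _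
  -- A side: the two ranges as mapped List.range, the appending folds as flatMap/map
  rw [pyRange_eq_count im_rows _ hs, pyRange_eq_count im_cols _ hs, ← hNr, ← hNc]
  simp only [PySem.List.foldl_append_singleton_eq_map, PySem.List.foldl_append_eq_flatMap,
    List.nil_append, List.flatMap_map, List.map_map]
  -- B side: the flat range as List.range, Python divmod as Nat divmod
  rw [show Nr * Nc = ((Nr.toNat * Nc.toNat : Nat) : Int) by
        push_cast [Int.toNat_of_nonneg hNr0, Int.toNat_of_nonneg hNc0]; ring,
    PySem.List.pyRange_zero_natCast, List.map_map,
    show Nc = ((Nc.toNat : Nat) : Int) from (Int.toNat_of_nonneg hNc0).symm]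
  simp only [Function.comp_def, Int.toNat_natCast, PySem.Int.floordiv_natCast,
    PySem.Int.mod_natCast]
  rw [range_mul_divmod (fun a b =>
    [((a : Int) * (chunk_size - kernel_size)),
     max ((a : Int) * (chunk_size - kernel_size) - kernel_size) 0,
     min ((a : Int) * (chunk_size - kernel_size) + chunk_size + kernel_size) (im_rows - 1),
     if (a : Int) * (chunk_size - kernel_size) < kernel_size then 0 else kernel_size,
     ((b : Int) * (chunk_size - kernel_size)),
     max ((b : Int) * (chunk_size - kernel_size) - kernel_size) 0,
     min ((b : Int) * (chunk_size - kernel_size) + chunk_size + kernel_size) (im_cols - 1),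
     if (b : Int) * (chunk_size - kernel_size) < kernel_size then 0 else kernel_size,
     min (chunk_size + 2 * kernel_size) (im_rows - max ((a : Int) * (chunk_size - kernel_size) - kernel_size) 0),
     min (chunk_size + 2 * kernel_size) (im_cols - max ((b : Int) * (chunk_size - kernel_size) - kernel_size) 0)])
    Nr.toNat Nc.toNat]
  -- pointwise equality of the assembled records
  apply List.flatMap_congr
  intro a _
  rw [mul_comm ((a : Int)) (chunk_size - kernel_size)]
  apply List.map_congr_left
  intro b _
  rw [mul_comm ((b : Int)) (chunk_size - kernel_size)]
  generalize (chunk_size - kernel_size) * (a : Int) = i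
  generalize (chunk_size - kernel_size) * (b : Int) = j
  simp only [n_rows_cols, List.cons.injEq, and_true]
  repeat' apply And.intro
  all_goals (try split_ifs) <;> first | omega | trivial

-- ===== VERDICT (by name: the statement is the Claim_ definition above) =====
theorem get_block_chunks_spec : Claim_equal_get_block_chunks := by
  intro im_rows im_cols chunk_size kernel_size _ hpre
  exact main_eq im_rows im_cols chunk_size kernel_size hpre
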